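-- pv_equiv track=rewrite | github.com/jc7k/nl-fhir | tests/framework/qa_framework.py | _determine_tier_used
-- ===== SOURCE A (Python) =====
-- from typing import Dict, List, Any, Optional, Union
--
-- def _determine_tier_used(extracted_entities: Dict) -> str:
--     """Determine which processing tier was used based on entity methods"""
--     methods = set()
--     for category, entities in extracted_entities.items():
--         for entity in entities:
--             if 'method' in entity:
--                 methods.add(entity['method'])
--
--     if any('llm' in method for method in methods):
--         return "llm"
--     elif any('transformer' in method for method in methods):
--         return "transformers"
--     elif any('spacy' in method for method in methods):
--         return "spacy"
--     elif any('regex' in method for method in methods):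
--         return "regex"
--     else:
--         return "unknown"
-- ===== SOURCE B (Python) =====
-- _LABELS = ("llm", "transformers", "spacy", "regex", "unknown")
--
--
-- def _rank(method):
--     """Priority rank of a method string: lower = higher-priority tier."""
--     if 'llm' in method:
--         return 0
--     if 'transformer' in method:
--         return 1
--     if 'spacy' in method:
--         return 2
--     if 'regex' in method:
--         return 3
--     return 4
--
--
-- def _determine_tier_used(extracted_entities):
--     """Single accumulating pass: keep the minimum tier rank seen."""
--     best = 4
--     for entities in extracted_entities.values():
--         for entity in entities:
--             if 'method' in entity:
--                 best = min(best, _rank(entity['method']))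
--     return _LABELS[best]
-- ===== Notes on version B (the rewrite author's own statement) =====
-- stated objective: simpler
-- what changed: Replaced A's intermediate method set plus four separate any() substring scans by a single accumulating pass that keeps the minimum tier rank per method and maps the final rank to its label.
import Mathlib
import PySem

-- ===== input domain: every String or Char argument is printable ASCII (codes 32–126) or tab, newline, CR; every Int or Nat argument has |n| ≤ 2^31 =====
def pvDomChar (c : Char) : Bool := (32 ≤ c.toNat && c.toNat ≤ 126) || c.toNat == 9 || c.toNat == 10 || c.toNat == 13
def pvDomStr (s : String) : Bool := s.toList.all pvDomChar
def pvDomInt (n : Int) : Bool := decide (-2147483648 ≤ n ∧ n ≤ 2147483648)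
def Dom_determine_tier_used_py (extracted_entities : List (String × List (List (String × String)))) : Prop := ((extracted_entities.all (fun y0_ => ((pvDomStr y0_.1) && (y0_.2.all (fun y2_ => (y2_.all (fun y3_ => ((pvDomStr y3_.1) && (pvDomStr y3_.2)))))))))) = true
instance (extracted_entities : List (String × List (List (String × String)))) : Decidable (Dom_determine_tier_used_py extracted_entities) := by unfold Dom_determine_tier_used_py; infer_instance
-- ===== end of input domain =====

-- B replaces A's intermediate set and four separate any() scans by one accumulating
-- pass keeping the minimum tier rank (objective: simpler; return value only).

-- ===== PORT A =====
def determine_tier_used_py (extracted_entities : List (String × List (List (String × String)))) : String :=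
  let methods : PySem.Set String :=
    extracted_entities.foldl (fun ms cat_entities =>
      cat_entities.2.foldl (fun ms entity =>
        -- "if 'method' in entity: methods.add(entity['method'])" — guarded dict access
        match (PySem.Dict.mk entity).get? "method" with
        | some m => PySem.Set.add ms m
        | none => ms) ms) PySem.Set.empty
  if methods.any (fun m => PySem.Str.isIn "llm" m) then "llm"
  else if methods.any (fun m => PySem.Str.isIn "transformer" m) then "transformers"
  else if methods.any (fun m => PySem.Str.isIn "spacy" m) then "spacy"
  else if methods.any (fun m => PySem.Str.isIn "regex" m) then "regex"
  else "unknown"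

-- ===== PORT B =====
def pvTierLabels : List String := ["llm", "transformers", "spacy", "regex", "unknown"]

def pvRank (method : String) : Nat :=
  if PySem.Str.isIn "llm" method then 0
  else if PySem.Str.isIn "transformer" method then 1
  else if PySem.Str.isIn "spacy" method then 2
  else if PySem.Str.isIn "regex" method then 3
  else 4

def determine_tier_used_py_alt (extracted_entities : List (String × List (List (String × String)))) : String :=
  let best : Nat :=
    extracted_entities.foldl (fun b cat_entities =>
      cat_entities.2.foldl (fun b entity =>
        match (PySem.Dict.mk entity).get? "method" with
        | some m => min b (pvRank m)
        | none => b) b) 4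
  pvTierLabels.getD best "unknown"

-- ===== PRECONDITION & SPEC =====
def Spec_determine_tier_used_py (extracted_entities : List (String × List (List (String × String)))) (out : String) : Prop := out = determine_tier_used_py_alt extracted_entities
instance (extracted_entities : List (String × List (List (String × String)))) (out : String) : Decidable (Spec_determine_tier_used_py extracted_entities out) := by unfold Spec_determine_tier_used_py; infer_instance

-- ===== CLAIM (what is proved, stated in full; the proofs are below) =====
def Claim_equal_determine_tier_used_py : Prop := ∀ (extracted_entities : List (String × List (List (String × String)))), Dom_determine_tier_used_py extracted_entities → Spec_determine_tier_used_py extracted_entities (determine_tier_used_py extracted_entities)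

-- ===== LEMMAS AND PROOFS =====

-- the method strings both loops visit, in order
def pvMethods (extracted_entities : List (String × List (List (String × String)))) : List String :=
  extracted_entities.flatMap (fun ce => ce.2.filterMap (fun e => (PySem.Dict.mk e).get? "method"))

-- a fold whose body matches on the guarded dict lookup is a fold over the filterMap
theorem inner_foldl_eq {β : Type} (h : β → String → β) (l : List (List (String × String))) :
    ∀ (b : β),
      l.foldl (fun b entity => match (PySem.Dict.mk entity).get? "method" with
          | some m => h b m | none => b) b
        = (l.filterMap (fun e => (PySem.Dict.mk e).get? "method")).foldl h b := by
  induction l with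
  | nil => intro b; rfl
  | cons x t ih =>
      intro b
      simp only [List.foldl_cons, List.filterMap_cons]
      cases (PySem.Dict.mk x).get? "method" <;> simp [ih]

theorem nested_foldl_eq {β : Type} (h : β → String → β)
    (ee : List (String × List (List (String × String)))) : ∀ (b : β),
    ee.foldl (fun b ce => ce.2.foldl (fun b entity =>
        match (PySem.Dict.mk entity).get? "method" with
        | some m => h b m | none => b) b) b
      = (pvMethods ee).foldl h b := by
  induction ee with
  | nil => intro b; rfl
  | cons x t ih =>
      intro b
      simp only [List.foldl_cons, pvMethods, List.flatMap_cons, List.foldl_append]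
      rw [inner_foldl_eq, ih]
      rfl

-- Set.add then any = or
theorem any_set_add (ms : PySem.Set String) (m : String) (p : String → Bool) :
    (PySem.Set.add ms m).any p = (ms.any p || p m) := by
  by_cases hm : m ∈ ms
  · by_cases hp : p m = true
    · have : ms.any p = true := List.any_eq_true.mpr ⟨m, hm, hp⟩
      simp [PySem.Set.add, hm, hp, this]
    · simp [PySem.Set.add, hm, Bool.eq_false_iff.mpr hp]
  · simp [PySem.Set.add, hm, List.any_append]

theorem any_fold_add (p : String → Bool) :
    ∀ (M : List String) (ms : PySem.Set String),
      (M.foldl PySem.Set.add ms).any p = (ms.any p || M.any p) := by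
  intro M
  induction M with
  | nil => intro ms; simp
  | cons x t ih =>
      intro ms
      simp only [List.foldl_cons, List.any_cons, ih, any_set_add]
      cases ms.any p <;> cases p x <;> simp

-- B's fold-min over M, starting at b ≤ 4
theorem fold_min_le (M : List String) : ∀ (b : Nat),
    M.foldl (fun b m => min b (pvRank m)) b ≤ b := by
  induction M with
  | nil => intro b; simp
  | cons x t ih =>
      intro b
      exact le_trans (ih _) (min_le_left _ _)

theorem fold_min_le_iff (i : Nat) : ∀ (M : List String) (b : Nat),
    (M.foldl (fun b m => min b (pvRank m)) b ≤ i
      ↔ b ≤ i ∨ M.any (fun m => decide (pvRank m ≤ i)) = true) := by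
  intro M
  induction M with
  | nil => intro b; simp
  | cons x t ih =>
      intro b
      simp only [List.foldl_cons, List.any_cons, ih, Bool.or_eq_true,
        decide_eq_true_eq, min_le_iff]
      tauto

-- rank-level membership facts
theorem pvRank_le_zero_iff (m : String) : pvRank m ≤ 0 ↔ PySem.Str.isIn "llm" m = true := by
  unfold pvRank; split_ifs <;> simp_all

theorem pvRank_le_one_iff (m : String) :
    pvRank m ≤ 1 ↔ (PySem.Str.isIn "llm" m = true ∨ PySem.Str.isIn "transformer" m = true) := by
  unfold pvRank; split_ifs <;> simp_all

theorem pvRank_le_two_iff (m : String) :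
    pvRank m ≤ 2 ↔ (PySem.Str.isIn "llm" m = true ∨ PySem.Str.isIn "transformer" m = true
      ∨ PySem.Str.isIn "spacy" m = true) := by
  unfold pvRank; split_ifs <;> simp_all

theorem pvRank_le_three_iff (m : String) :
    pvRank m ≤ 3 ↔ (PySem.Str.isIn "llm" m = true ∨ PySem.Str.isIn "transformer" m = true
      ∨ PySem.Str.isIn "spacy" m = true ∨ PySem.Str.isIn "regex" m = true) := by
  unfold pvRank; split_ifs <;> simp_all

-- the core fact: the chained any()-test over M equals the label of the fold-min over M
theorem chain_eq_label (M : List String) :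
    (if M.any (fun m => PySem.Str.isIn "llm" m) then "llm"
     else if M.any (fun m => PySem.Str.isIn "transformer" m) then "transformers"
     else if M.any (fun m => PySem.Str.isIn "spacy" m) then "spacy"
     else if M.any (fun m => PySem.Str.isIn "regex" m) then "regex"
     else "unknown")
    = pvTierLabels.getD (M.foldl (fun b m => min b (pvRank m)) 4) "unknown" := by
  set r := M.foldl (fun b m => min b (pvRank m)) 4 with hr
  have hr4 : r ≤ 4 := fold_min_le M 4
  have key : ∀ i : Nat, i < 4 → (r ≤ i ↔ ∃ m ∈ M, pvRank m ≤ i) := by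
    intro i hi
    rw [hr, fold_min_le_iff]
    constructor
    · rintro (h | h)
      · omega
      · simpa using h
    · intro h
      right
      simpa using h
  have noneBelow : ∀ i : Nat, i < 4 → ¬ r ≤ i → ∀ m ∈ M, ¬ pvRank m ≤ i := by
    intro i hi hno m hm hcon
    exact hno ((key i hi).mpr ⟨m, hm, hcon⟩)
  have hcases : r = 0 ∨ r = 1 ∨ r = 2 ∨ r = 3 ∨ r = 4 := by omega
  rcases hcases with h | h | h | h | h
  all_goals rw [h] at key noneBelow ⊢
  · -- r = 0: some method contains "llm"
    obtain ⟨m, hm, hrk⟩ := (key 0 (by norm_num)).mp le_rfl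
    have hA0 : M.any (fun m => PySem.Str.isIn "llm" m) = true :=
      List.any_eq_true.mpr ⟨m, hm, (pvRank_le_zero_iff m).mp hrk⟩
    rw [hA0]
    simp [pvTierLabels]
  · -- r = 1
    have h0 := noneBelow 0 (by norm_num) (by omega)
    have hA0 : M.any (fun m => PySem.Str.isIn "llm" m) = false := by
      rw [List.any_eq_false]
      intro m hm hcon
      exact h0 m hm ((pvRank_le_zero_iff m).mpr hcon)
    obtain ⟨m, hm, hrk⟩ := (key 1 (by norm_num)).mp le_rfl
    have hA1 : M.any (fun m => PySem.Str.isIn "transformer" m) = true := by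
      rcases (pvRank_le_one_iff m).mp hrk with hc | hc
      · exact absurd ((pvRank_le_zero_iff m).mpr hc) (h0 m hm)
      · exact List.any_eq_true.mpr ⟨m, hm, hc⟩
    rw [hA0, hA1]
    simp [pvTierLabels]
  · -- r = 2
    have h1 := noneBelow 1 (by norm_num) (by omega)
    have h0 : ∀ m ∈ M, ¬ pvRank m ≤ 0 := fun m hm hc => h1 m hm (le_trans hc (by omega))
    have hA0 : M.any (fun m => PySem.Str.isIn "llm" m) = false := by
      rw [List.any_eq_false]
      intro m hm hcon
      exact h0 m hm ((pvRank_le_zero_iff m).mpr hcon)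
    have hA1 : M.any (fun m => PySem.Str.isIn "transformer" m) = false := by
      rw [List.any_eq_false]
      intro m hm hcon
      exact h1 m hm ((pvRank_le_one_iff m).mpr (Or.inr hcon))
    obtain ⟨m, hm, hrk⟩ := (key 2 (by norm_num)).mp le_rfl
    have hA2 : M.any (fun m => PySem.Str.isIn "spacy" m) = true := by
      rcases (pvRank_le_two_iff m).mp hrk with hc | hc | hc
      · exact absurd ((pvRank_le_one_iff m).mpr (Or.inl hc)) (h1 m hm)
      · exact absurd ((pvRank_le_one_iff m).mpr (Or.inr hc)) (h1 m hm)
      · exact List.any_eq_true.mpr ⟨m, hm, hc⟩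
    rw [hA0, hA1, hA2]
    simp [pvTierLabels]
  · -- r = 3
    have h2 := noneBelow 2 (by norm_num) (by omega)
    have h1 : ∀ m ∈ M, ¬ pvRank m ≤ 1 := fun m hm hc => h2 m hm (le_trans hc (by omega))
    have hA0 : M.any (fun m => PySem.Str.isIn "llm" m) = false := by
      rw [List.any_eq_false]
      intro m hm hcon
      exact h1 m hm ((pvRank_le_one_iff m).mpr (Or.inl hcon))
    have hA1 : M.any (fun m => PySem.Str.isIn "transformer" m) = false := by
      rw [List.any_eq_false]
      intro m hm hcon
      exact h1 m hm ((pvRank_le_one_iff m).mpr (Or.inr hcon))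
    have hA2 : M.any (fun m => PySem.Str.isIn "spacy" m) = false := by
      rw [List.any_eq_false]
      intro m hm hcon
      exact h2 m hm ((pvRank_le_two_iff m).mpr (Or.inr (Or.inr hcon)))
    obtain ⟨m, hm, hrk⟩ := (key 3 (by norm_num)).mp le_rfl
    have hA3 : M.any (fun m => PySem.Str.isIn "regex" m) = true := by
      rcases (pvRank_le_three_iff m).mp hrk with hc | hc | hc | hc
      · exact absurd ((pvRank_le_two_iff m).mpr (Or.inl hc)) (h2 m hm)
      · exact absurd ((pvRank_le_two_iff m).mpr (Or.inr (Or.inl hc))) (h2 m hm)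
      · exact absurd ((pvRank_le_two_iff m).mpr (Or.inr (Or.inr hc))) (h2 m hm)
      · exact List.any_eq_true.mpr ⟨m, hm, hc⟩
    rw [hA0, hA1, hA2, hA3]
    simp [pvTierLabels]
  · -- r = 4: no tier keyword matched
    have h3 := noneBelow 3 (by norm_num) (by omega)
    have hA0 : M.any (fun m => PySem.Str.isIn "llm" m) = false := by
      rw [List.any_eq_false]
      intro m hm hcon
      exact h3 m hm ((pvRank_le_three_iff m).mpr (Or.inl hcon))
    have hA1 : M.any (fun m => PySem.Str.isIn "transformer" m) = false := by
      rw [List.any_eq_false]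
      intro m hm hcon
      exact h3 m hm ((pvRank_le_three_iff m).mpr (Or.inr (Or.inl hcon)))
    have hA2 : M.any (fun m => PySem.Str.isIn "spacy" m) = false := by
      rw [List.any_eq_false]
      intro m hm hcon
      exact h3 m hm ((pvRank_le_three_iff m).mpr (Or.inr (Or.inr (Or.inl hcon))))
    have hA3 : M.any (fun m => PySem.Str.isIn "regex" m) = false := by
      rw [List.any_eq_false]
      intro m hm hcon
      exact h3 m hm ((pvRank_le_three_iff m).mpr (Or.inr (Or.inr (Or.inr hcon))))
    rw [hA0, hA1, hA2, hA3]
    simp [pvTierLabels]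

-- ===== VERDICT (by name: the statement is the Claim_ definition above) =====
theorem determine_tier_used_py_spec : Claim_equal_determine_tier_used_py := by
  intro ee _
  unfold Spec_determine_tier_used_py determine_tier_used_py determine_tier_used_py_alt
  rw [nested_foldl_eq, nested_foldl_eq]
  simp only [any_fold_add, PySem.Set.empty, List.any_nil, Bool.false_or]
  exact chain_eq_label (pvMethods ee)
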